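-- pv_equiv track=rewrite | github.com/ChunkyTortoise/docextract | frontend/pages/prompt_lab.py | _parse_changelog
-- ===== SOURCE A (Python) =====
-- def _parse_changelog(raw: str) -> list[dict]:
--     """Parse CHANGELOG.md into a list of {version, date, category, summary} rows."""
--     rows: list[dict] = []
--     current: dict | None = None
--     for line in raw.splitlines():
--         line = line.rstrip()
--         if line.startswith("## ["):
--             # e.g.  ## [1.1.0] - 2026-03-22 - extraction/
--             parts = line[3:].split("]")
--             version = parts[0].strip("[").strip()
--             rest = parts[1] if len(parts) > 1 else ""
--             rest_parts = [p.strip() for p in rest.split(" - ") if p.strip()]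
--             date = rest_parts[0] if rest_parts else ""
--             category = rest_parts[1] if len(rest_parts) > 1 else ""
--             current = {"version": version, "date": date, "category": category, "summary": ""}
--             rows.append(current)
--         elif current is not None and line.startswith("- "):
--             bullet = line[2:].strip()
--             if current["summary"]:
--                 current["summary"] += "; " + bullet
--             else:
--                 current["summary"] = bullet
--     return rows
-- ===== SOURCE B (Python) =====
-- def _header_fields(line):
--     parts = line[3:].split("]")
--     version = parts[0].strip("[").strip()
--     rest = parts[1] if len(parts) > 1 else ""
--     rest_parts = [p.strip() for p in rest.split(" - ") if p.strip()]
--     date = rest_parts[0] if rest_parts else ""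
--     category = rest_parts[1] if len(rest_parts) > 1 else ""
--     return version, date, category
--
--
-- def _row(header, body):
--     version, date, category = _header_fields(header)
--     bullets = [l[2:].strip() for l in body if l.startswith("- ")]
--     return {"version": version, "date": date, "category": category,
--             "summary": "; ".join(bullets)}
--
--
-- def _parse_changelog(raw: str) -> list[dict]:
--     """Segment the lines into (header, body) sections first, then map each
--     section to its row, joining the bullet texts with '; '."""
--     sections: list[tuple[str, list[str]]] = []
--     for line in raw.splitlines():
--         line = line.rstrip()
--         if line.startswith("## ["):
--             sections.append((line, []))
--         elif sections:
--             sections[-1][1].append(line)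
--     return [_row(h, b) for h, b in sections]
-- ===== Notes on version B (the rewrite author's own statement) =====
-- stated objective: alternative
-- what changed: A's single stateful loop (which mutates the last-appended row's summary with a conditional separator prepend) is replaced by a two-phase decomposition: first segment the rstripped lines into (header, body) sections, then map each section to its row with the summary built by joining the list of bullet texts with the separator.
import Mathlib
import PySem

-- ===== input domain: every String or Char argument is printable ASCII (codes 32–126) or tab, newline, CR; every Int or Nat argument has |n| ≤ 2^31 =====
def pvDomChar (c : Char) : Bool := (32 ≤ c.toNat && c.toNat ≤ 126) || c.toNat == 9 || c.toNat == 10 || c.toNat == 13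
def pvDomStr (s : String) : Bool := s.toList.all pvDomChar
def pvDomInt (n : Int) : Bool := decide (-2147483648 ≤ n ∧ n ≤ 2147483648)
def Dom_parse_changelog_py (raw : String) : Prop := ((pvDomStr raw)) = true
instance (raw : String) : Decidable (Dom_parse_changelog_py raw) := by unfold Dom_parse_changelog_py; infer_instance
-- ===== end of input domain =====

-- B re-decomposes A's single stateful loop into a segmentation pass (header/body sections)
-- followed by a per-section mapping whose summary is '; '.join over the bullet list;
-- same values, same cost (objective: alternative decomposition).
-- Both ports work over List Char (PySem.Chars) with a row as a 4-tuple: A's dict always has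
-- exactly the keys version/date/category/summary inserted in this order ('summary' is
-- overwritten in place), so its rendered association list is exactly pvRowOut of the tuple.

-- ===== PORT A =====
-- the header parse both Pythons perform: line[3:].split(']'), strip '[' and spaces,
-- split the rest on ' - ' (A inlines this code; B's Python has it as helper _header_fields
-- with the identical body, so both ports cite this one definition)
def pvHeaderFields (l : List Char) : List Char × List Char × List Char :=
  let parts := PySem.Chars.splitOn (l.drop 3) [']']   -- l[3:] with 3 ≥ 0 is List.drop 3
  let version := PySem.Chars.strip (PySem.Chars.stripChars (parts.getD 0 []) ['['])
  let rest := if 1 < parts.length then parts.getD 1 [] else []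
  let rest_parts := ((PySem.Chars.splitOn rest [' ', '-', ' ']).map PySem.Chars.strip).filter (· ≠ [])
  let date := rest_parts.getD 0 []
  let category := rest_parts.getD 1 []
  (version, date, category)

-- a row rendered as the association list A's dict produces
def pvRowOut (r : List Char × List Char × List Char × List Char) : List (String × String) :=
  [("version", String.mk r.1), ("date", String.mk r.2.1),
   ("category", String.mk r.2.2.1), ("summary", String.mk r.2.2.2)]

-- A's loop: rows already closed (without current) plus the current row if any;
-- Python's 'current' is always the most recently appended element of 'rows',
-- so rows = done ++ cur.toList at every step
def pvLoopA (ls : List (List Char)) (done : List (List Char × List Char × List Char × List Char))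
    (cur : Option (List Char × List Char × List Char × List Char)) :
    List (List Char × List Char × List Char × List Char) :=
  match ls with
  | [] => done ++ cur.toList
  | l :: ls =>
    let l' := PySem.Chars.rstrip l
    if PySem.Chars.startswith l' ['#', '#', ' ', '['] then
      let (v, d, c) := pvHeaderFields l'
      pvLoopA ls (done ++ cur.toList) (some (v, d, c, []))
    else
      match cur with
      | some r =>
        if PySem.Chars.startswith l' ['-', ' '] then
          let bullet := PySem.Chars.strip (l'.drop 2)
          pvLoopA ls done (some (r.1, r.2.1, r.2.2.1,
            if r.2.2.2 ≠ [] then r.2.2.2 ++ ';' :: ' ' :: bullet else bullet))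
        else pvLoopA ls done (some r)
      | none => pvLoopA ls done none

def parse_changelog_py (raw : String) : List (List (String × String)) :=
  (pvLoopA (PySem.Chars.splitlines raw.toList) [] none).map pvRowOut

-- ===== PORT B =====
-- B phase 1 step: a header line opens a new section, any other line joins the last section's body
def pvStepB (secs : List (List Char × List (List Char))) (l : List Char) :
    List (List Char × List (List Char)) :=
  if PySem.Chars.startswith l ['#', '#', ' ', '['] then secs ++ [(l, [])]
  else
    match secs.getLast? with
    | some (h, b) => secs.dropLast ++ [(h, b ++ [l])]
    | none => secs

-- B phase 2: a section to its row; summary = '; '.join of the bullet texts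
def pvRowB (g : List Char × List (List Char)) : List Char × List Char × List Char × List Char :=
  let (v, d, c) := pvHeaderFields g.1
  let bullets := (g.2.filter (fun l => PySem.Chars.startswith l ['-', ' '])).map
    (fun l => PySem.Chars.strip (l.drop 2))
  (v, d, c, PySem.Chars.join [';', ' '] bullets)

def parse_changelog_py_alt (raw : String) : List (List (String × String)) :=
  let lines := (PySem.Chars.splitlines raw.toList).map PySem.Chars.rstrip
  let secs := lines.foldl pvStepB []
  secs.map (fun g => pvRowOut (pvRowB g))

-- ===== PRECONDITION & SPEC =====
def Spec_parse_changelog_py (raw : String) (out : List (List (String × String))) : Prop := out = parse_changelog_py_alt raw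
instance (raw : String) (out : List (List (String × String))) : Decidable (Spec_parse_changelog_py raw out) := by unfold Spec_parse_changelog_py; infer_instance

-- ===== CLAIM (what is proved, stated in full; the proofs are below) =====
def Claim_equal_parse_changelog_py : Prop := ∀ (raw : String), Dom_parse_changelog_py raw → Spec_parse_changelog_py raw (parse_changelog_py raw)

-- ===== LEMMAS AND PROOFS =====

-- A's loop without the 'done' accumulator
def pvF (ls : List (List Char)) (cur : Option (List Char × List Char × List Char × List Char)) :
    List (List Char × List Char × List Char × List Char) :=
  match ls with
  | [] => cur.toList
  | l :: ls =>
    let l' := PySem.Chars.rstrip l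
    if PySem.Chars.startswith l' ['#', '#', ' ', '['] then
      let (v, d, c) := pvHeaderFields l'
      cur.toList ++ pvF ls (some (v, d, c, []))
    else
      match cur with
      | some r =>
        if PySem.Chars.startswith l' ['-', ' '] then
          let bullet := PySem.Chars.strip (l'.drop 2)
          pvF ls (some (r.1, r.2.1, r.2.2.1,
            if r.2.2.2 ≠ [] then r.2.2.2 ++ ';' :: ' ' :: bullet else bullet))
        else pvF ls (some r)
      | none => pvF ls none

lemma pvLoopA_eq_pvF (ls : List (List Char)) :
    ∀ done cur, pvLoopA ls done cur = done ++ pvF ls cur := by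
  induction ls with
  | nil => intro done cur; simp [pvLoopA, pvF]
  | cons l ls ih =>
    intro done cur
    simp only [pvLoopA, pvF]
    cases cur with
    | none =>
      by_cases h : PySem.Chars.startswith (PySem.Chars.rstrip l) ['#', '#', ' ', '['] = true
      · rw [if_pos h, if_pos h]
        obtain ⟨v, d, c⟩ := pvHeaderFields (PySem.Chars.rstrip l)
        simp [ih]
      · rw [if_neg h, if_neg h]
        exact ih done none
    | some r =>
      split_ifs with h h2
      · obtain ⟨v, d, c⟩ := pvHeaderFields (PySem.Chars.rstrip l)
        simp [ih, List.append_assoc]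
      · simp [ih]
      · simp [ih]

-- proof-side recursive description of B's sections (accumulator kept nonempty)
def pvT (ls : List (List Char)) (h : List Char) (b : List (List Char)) :
    List (List Char × List (List Char)) :=
  match ls with
  | [] => [(h, b)]
  | l :: ls =>
    if PySem.Chars.startswith l ['#', '#', ' ', '['] then (h, b) :: pvT ls l []
    else pvT ls h (b ++ [l])

lemma pvFoldl_stepB (ls : List (List Char)) :
    ∀ (secs : List (List Char × List (List Char))) (h : List Char) (b : List (List Char)),
      ls.foldl pvStepB (secs ++ [(h, b)]) = secs ++ pvT ls h b := by
  induction ls with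
  | nil => intro secs h b; simp [pvT]
  | cons l ls ih =>
    intro secs h b
    simp only [List.foldl_cons, pvStepB, pvT]
    split_ifs with hh
    · rw [show secs ++ [(h, b)] ++ [(l, [])] = (secs ++ [(h, b)]) ++ [(l, [])] by simp,
        ih (secs ++ [(h, b)]) l []]
      simp
    · simp [ih]

-- the bullet texts of a body and A's conditional summary accumulation
def pvBullets (b : List (List Char)) : List (List Char) :=
  (b.filter (fun l => PySem.Chars.startswith l ['-', ' '])).map
    (fun l => PySem.Chars.strip (l.drop 2))

def pvCond (s t : List Char) : List Char := if s ≠ [] then s ++ ';' :: ' ' :: t else t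

lemma pvDropWhile_idem (p : Char → Bool) (l : List Char) :
    List.dropWhile p (List.dropWhile p l) = List.dropWhile p l := by
  cases h : List.dropWhile p l with
  | nil => rfl
  | cons a t =>
    have ha : p a = false := by
      have := List.head_dropWhile_not p (l := l) (by simp [h])
      simpa [h] using this
    simp [ha]

lemma pvRstrip_idem (x : List Char) : PySem.Chars.rstrip (PySem.Chars.rstrip x) = PySem.Chars.rstrip x := by
  simp [PySem.Chars.rstrip, pvDropWhile_idem]

lemma pvGetLast?_mem {x : List Char} {c : Char} (h : x.getLast? = some c) : c ∈ x := by
  rw [List.getLast?_eq_head?_reverse] at h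
  cases hx : x.reverse with
  | nil => rw [hx] at h; simp at h
  | cons a t =>
    rw [hx] at h; simp at h
    have : c ∈ x.reverse := by rw [hx, h]; exact List.mem_cons_self
    simpa using this

lemma pvRstrip_fix_last {x : List Char} {c : Char} (hx : PySem.Chars.rstrip x = x)
    (hl : x.getLast? = some c) : PySem.Chars.isspace c = false := by
  by_contra h
  rw [Bool.not_eq_false] at h
  have hrev : x.reverse.head? = some c := by rw [← List.getLast?_eq_head?_reverse]; exact hl
  obtain ⟨t, ht⟩ : ∃ t, x.reverse = c :: t := by
    cases hx2 : x.reverse with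
    | nil => rw [hx2] at hrev; simp at hrev
    | cons a t => rw [hx2] at hrev; simp at hrev; exact ⟨t, by rw [hrev]⟩
  have hlen := congrArg List.length hx
  simp only [PySem.Chars.rstrip, ht, List.dropWhile_cons, h, if_pos, List.length_reverse] at hlen
  have h1 : (List.dropWhile PySem.Chars.isspace t).length ≤ t.length := List.length_dropWhile_le _ _
  have h2 : x.length = t.length + 1 := by
    have := congrArg List.length ht; simpa using this
  omega

lemma pvStrip_ne_nil {x : List Char} (hx : PySem.Chars.rstrip x = x)
    (hs : PySem.Chars.startswith x ['-', ' '] = true) :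
    PySem.Chars.strip (x.drop 2) ≠ [] := by
  rw [PySem.Chars.startswith_iff] at hs
  obtain ⟨rest, hrest⟩ := hs
  subst hrest
  cases rest with
  | nil => exact absurd hx (by decide)
  | cons r t =>
    simp only [List.cons_append, List.nil_append] at hx ⊢
    have hgl : ∃ cl, (r :: t).getLast? = some cl := by
      cases hg : (r :: t).getLast? with
      | none => simp at hg
      | some cl => exact ⟨cl, rfl⟩
    obtain ⟨cl, hcl⟩ := hgl
    have hxl : ('-' :: ' ' :: r :: t).getLast? = some cl := by
      rw [List.getLast?_cons_cons, List.getLast?_cons_cons]; exact hcl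
    have hns : PySem.Chars.isspace cl = false := pvRstrip_fix_last hx hxl
    have hdrop : ('-' :: ' ' :: r :: t).drop 2 = r :: t := rfl
    rw [hdrop]
    -- strip = rstrip (lstrip -)
    have hls_ne : PySem.Chars.lstrip (r :: t) ≠ [] := by
      simp only [PySem.Chars.lstrip, Ne, List.dropWhile_eq_nil_iff]
      intro hall
      exact absurd (hall cl (pvGetLast?_mem hcl)) (by simp [hns])
    have hls_last : (PySem.Chars.lstrip (r :: t)).getLast? = some cl := by
      obtain ⟨pre, hpre⟩ := List.dropWhile_suffix (l := r :: t) PySem.Chars.isspace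
      have := hcl
      rw [← hpre, List.getLast?_append] at this
      cases hg2 : (PySem.Chars.lstrip (r :: t)).getLast? with
      | none =>
        exact absurd (List.getLast?_eq_none_iff.mp hg2) hls_ne
      | some d =>
        simp only [PySem.Chars.lstrip] at hg2
        rw [hg2] at this
        simpa using this
    have hmem : cl ∈ PySem.Chars.lstrip (r :: t) := pvGetLast?_mem hls_last
    simp only [PySem.Chars.strip, PySem.Chars.rstrip, Ne, List.reverse_eq_nil_iff,
      List.dropWhile_eq_nil_iff]
    intro hall
    exact absurd (hall cl (by simpa using hmem)) (by simp [hns])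

lemma pvFoldl_cond_of_ne (ts : List (List Char)) :
    ∀ s, s ≠ [] → ts.foldl pvCond s = s ++ ts.flatMap (fun t => ';' :: ' ' :: t) := by
  induction ts with
  | nil => intro s _; simp
  | cons t ts ih =>
    intro s hs
    have : pvCond s t = s ++ ';' :: ' ' :: t := by simp [pvCond, hs]
    rw [List.foldl_cons, this, ih _ (by simp)]
    simp

lemma pvJoin_eq_flatMap (t : List Char) (ts : List (List Char)) :
    PySem.Chars.join [';', ' '] (t :: ts) = t ++ ts.flatMap (fun u => ';' :: ' ' :: u) := by
  induction ts generalizing t with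
  | nil => simp [PySem.Chars.join_singleton]
  | cons b ts ih => rw [PySem.Chars.join_cons_cons, ih b]; simp

lemma pvSum_eq_join (ts : List (List Char)) (hne : ∀ t ∈ ts, t ≠ []) :
    ts.foldl pvCond [] = PySem.Chars.join [';', ' '] ts := by
  cases ts with
  | nil => simp [PySem.Chars.join_nil]
  | cons t ts =>
    have ht : t ≠ [] := hne t (by simp)
    have h0 : pvCond [] t = t := by simp [pvCond]
    rw [List.foldl_cons, h0, pvFoldl_cond_of_ne ts t ht, pvJoin_eq_flatMap]

lemma pvBullets_ne_nil {b : List (List Char)} (hb : ∀ x ∈ b, PySem.Chars.rstrip x = x) :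
    ∀ t ∈ pvBullets b, t ≠ [] := by
  intro t ht
  simp only [pvBullets, List.mem_map, List.mem_filter] at ht
  obtain ⟨x, ⟨hxb, hxs⟩, rfl⟩ := ht
  exact pvStrip_ne_nil (hb x hxb) hxs

lemma pvRowB_eq (h : List Char) {b : List (List Char)}
    (hb : ∀ x ∈ b, PySem.Chars.rstrip x = x) :
    pvRowB (h, b) =
      ((pvHeaderFields h).1, (pvHeaderFields h).2.1, (pvHeaderFields h).2.2,
        (pvBullets b).foldl pvCond []) := by
  rw [pvSum_eq_join _ (pvBullets_ne_nil hb)]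
  simp only [pvRowB, pvBullets]

lemma pvBullets_append_bullet {b : List (List Char)} {l : List Char}
    (hl : PySem.Chars.startswith l ['-', ' '] = true) :
    pvBullets (b ++ [l]) = pvBullets b ++ [PySem.Chars.strip (l.drop 2)] := by
  simp [pvBullets, List.filter_append, hl]

lemma pvBullets_append_other {b : List (List Char)} {l : List Char}
    (hl : ¬ PySem.Chars.startswith l ['-', ' '] = true) :
    pvBullets (b ++ [l]) = pvBullets b := by
  simp [pvBullets, List.filter_append, hl]

lemma pvF_eq_T (ls : List (List Char)) :
    ∀ (h : List Char) (b : List (List Char)), (∀ x ∈ b, PySem.Chars.rstrip x = x) →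
      pvF ls (some ((pvHeaderFields h).1, (pvHeaderFields h).2.1, (pvHeaderFields h).2.2,
          (pvBullets b).foldl pvCond [])) =
        (pvT (ls.map PySem.Chars.rstrip) h b).map pvRowB := by
  induction ls with
  | nil =>
    intro h b hb
    simp [pvF, pvT, pvRowB_eq h hb]
  | cons l ls ih =>
    intro h b hb
    simp only [pvF, List.map_cons, pvT]
    by_cases hh : PySem.Chars.startswith (PySem.Chars.rstrip l) ['#', '#', ' ', '['] = true
    · rw [if_pos hh, if_pos hh]
      have hnew := ih (PySem.Chars.rstrip l) [] (by simp)
      simp only [pvBullets, List.filter_nil, List.map_nil, List.foldl_nil] at hnew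
      simp only [List.map_cons, pvRowB_eq h hb, Option.toList_some, List.cons_append,
        List.nil_append]
      exact congrArg (List.cons _) hnew
    · rw [if_neg hh, if_neg hh]
      by_cases hbu : PySem.Chars.startswith (PySem.Chars.rstrip l) ['-', ' '] = true
      · rw [if_pos hbu]
        have hb' : ∀ x ∈ b ++ [PySem.Chars.rstrip l], PySem.Chars.rstrip x = x := by
          intro x hx
          rcases List.mem_append.mp hx with hx | hx
          · exact hb x hx
          · simp at hx; rw [hx]; exact pvRstrip_idem l
        have := ih h (b ++ [PySem.Chars.rstrip l]) hb'
        rw [pvBullets_append_bullet hbu, List.foldl_append] at this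
        simpa [pvCond] using this
      · rw [if_neg hbu]
        have := ih h (b ++ [PySem.Chars.rstrip l])
          (by intro x hx
              rcases List.mem_append.mp hx with hx | hx
              · exact hb x hx
              · simp at hx; rw [hx]; exact pvRstrip_idem l)
        rw [pvBullets_append_other hbu] at this
        exact this

lemma pvF_none (ls : List (List Char)) :
    pvF ls none = ((ls.map PySem.Chars.rstrip).foldl pvStepB []).map pvRowB := by
  induction ls with
  | nil => simp [pvF]
  | cons l ls ih =>
    simp only [pvF, List.map_cons, List.foldl_cons]
    by_cases hh : PySem.Chars.startswith (PySem.Chars.rstrip l) ['#', '#', ' ', '['] = true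
    · rw [if_pos hh]
      have hstep : pvStepB [] (PySem.Chars.rstrip l) = [] ++ [(PySem.Chars.rstrip l, [])] := by
        simp [pvStepB, hh]
      rw [hstep, pvFoldl_stepB]
      have := pvF_eq_T ls (PySem.Chars.rstrip l) [] (by simp)
      simp only [pvBullets, List.filter_nil, List.map_nil, List.foldl_nil] at this
      simpa using this
    · rw [if_neg hh]
      have hstep : pvStepB [] (PySem.Chars.rstrip l) = [] := by
        simp [pvStepB, hh]
      rw [hstep]
      exact ih

-- ===== VERDICT (by name: the statement is the Claim_ definition above) =====
theorem parse_changelog_py_spec : Claim_equal_parse_changelog_py := by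
  intro raw _
  unfold Spec_parse_changelog_py
  simp only [parse_changelog_py, parse_changelog_py_alt,
    pvLoopA_eq_pvF, List.nil_append, pvF_none, List.map_map]
  rfl
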